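-- pv_equiv track=rewrite | github.com/connect-community-church/connectclips | backend/app/services/reframe.py | _expand_to_per_frame
-- ===== SOURCE A (Python) =====
-- DETECT_EVERY_N = 3
--
-- def _expand_to_per_frame(
--     n_frames: int,
--     faces: list[dict | None],
--     sample_offset_frames: int = 0,
-- ) -> list[dict | None]:
--     """Repeat each sample DETECT_EVERY_N times to align with frame indices.
--
--     ``sample_offset_frames`` accounts for the case where the slice deliberately
--     includes one sample before frame_a (so the first frames of the clip carry
--     over the most recent face); we drop that many leading rows from the
--     expansion so the result aligns to clip-local frame 0.
--     """
--     per_frame: list[dict | None] = []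
--     for v in faces:
--         per_frame.extend([v] * DETECT_EVERY_N)
--     if sample_offset_frames > 0:
--         per_frame = per_frame[sample_offset_frames:]
--     if len(per_frame) >= n_frames:
--         return per_frame[:n_frames]
--     pad = (per_frame[-1] if per_frame else None)
--     return per_frame + [pad] * (n_frames - len(per_frame))
-- ===== SOURCE B (Python) =====
-- DETECT_EVERY_N = 3
--
-- def _expand_to_per_frame(
--     n_frames: int,
--     faces: list[dict | None],
--     sample_offset_frames: int = 0,
-- ) -> list[dict | None]:
--     # Compute each output frame directly by index arithmetic instead of
--     # materializing the repeated expansion.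
--     o = max(sample_offset_frames, 0)
--     L = max(0, len(faces) * DETECT_EVERY_N - o)  # length available after the offset drop
--     pad = faces[-1] if L > 0 else None
--     return [faces[(p + o) // DETECT_EVERY_N] if p < L else pad for p in range(n_frames)]
-- ===== Notes on version B (the rewrite author's own statement) =====
-- stated objective: simpler
-- what changed: B computes each output frame directly from its index with a floor division (faces[(p+o)//3]) in one comprehension over range(n_frames), never materializing the repeated expansion list or slicing/padding it.
-- intended difference: For negative n_frames (when the post-offset expansion is longer than |n_frames|) A returns per_frame[:n_frames], i.e. the expansion with its last |n_frames| elements chopped off, while B returns the empty list; an empty clip for a non-positive frame count is the intended value, A's is a Python negative-slice accident. — e.g. on _expand_to_per_frame(-1, [none], 0): A returns [none, none], B returns []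
import Mathlib
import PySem

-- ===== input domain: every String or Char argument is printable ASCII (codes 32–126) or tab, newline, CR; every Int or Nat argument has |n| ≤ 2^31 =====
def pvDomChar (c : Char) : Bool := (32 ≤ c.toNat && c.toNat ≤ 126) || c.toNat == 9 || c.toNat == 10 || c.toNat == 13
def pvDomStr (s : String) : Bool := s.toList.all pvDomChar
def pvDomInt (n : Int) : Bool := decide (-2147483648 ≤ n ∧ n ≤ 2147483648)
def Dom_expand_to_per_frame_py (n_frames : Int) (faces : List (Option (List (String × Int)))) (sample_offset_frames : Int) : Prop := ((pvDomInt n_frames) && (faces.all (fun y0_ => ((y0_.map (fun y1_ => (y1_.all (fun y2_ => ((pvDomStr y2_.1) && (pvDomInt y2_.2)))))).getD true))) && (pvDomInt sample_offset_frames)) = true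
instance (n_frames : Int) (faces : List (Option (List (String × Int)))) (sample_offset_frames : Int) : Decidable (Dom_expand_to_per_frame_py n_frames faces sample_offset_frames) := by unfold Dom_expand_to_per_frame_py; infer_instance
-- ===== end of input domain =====

-- B replaces the expand/slice/pad pipeline by a single comprehension computing each
-- output frame from its index with a floor division; equal to A except on negative
-- n_frames (see D_ below), where B returns the intended empty list.

-- ===== PORT A =====
def expand_to_per_frame_py (n_frames : Int) (faces : List (Option (List (String × Int)))) (sample_offset_frames : Int) : List (Option (List (String × Int))) :=
  -- per_frame = []; for v in faces: per_frame.extend([v] * DETECT_EVERY_N)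
  let per_frame0 := faces.foldl (fun acc v => acc ++ List.replicate 3 v) []
  -- if sample_offset_frames > 0: per_frame = per_frame[sample_offset_frames:]
  let per_frame := if sample_offset_frames > 0 then PySem.List.slice per_frame0 (some sample_offset_frames) none else per_frame0
  -- if len(per_frame) >= n_frames: return per_frame[:n_frames]
  if n_frames ≤ (per_frame.length : Int) then
    PySem.List.slice per_frame none (some n_frames)
  else
    -- pad = per_frame[-1] if per_frame else None   (getLastD none is exactly that)
    let pad := per_frame.getLastD none
    per_frame ++ List.replicate (n_frames - (per_frame.length : Int)).toNat pad

-- ===== PORT B =====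
def expand_to_per_frame_py_alt (n_frames : Int) (faces : List (Option (List (String × Int)))) (sample_offset_frames : Int) : List (Option (List (String × Int))) :=
  let o := max sample_offset_frames 0
  let L := max 0 ((faces.length : Int) * 3 - o)
  -- pad = faces[-1] if L > 0 else None  (L > 0 implies faces nonempty, so getLastD none = faces[-1])
  let pad := if 0 < L then faces.getLastD none else none
  (PySem.List.pyRange 0 n_frames 1).map (fun p =>
    -- faces[(p + o) // DETECT_EVERY_N]: index always in range when p < L (pyGetD is exact there)
    if p < L then PySem.List.pyGetD faces (PySem.Int.floordiv (p + o) 3) none else pad)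

-- ===== PRECONDITION & SPEC =====
-- For negative n_frames with a post-offset expansion longer than |n_frames|, A returns the
-- expansion with its last |n_frames| elements chopped off (a Python negative-slice accident);
-- B returns the intended empty list for a non-positive frame count.
def D_expand_to_per_frame_py (n_frames : Int) (faces : List (Option (List (String × Int)))) (sample_offset_frames : Int) : Prop :=
  n_frames < 0 ∧ 0 < max 0 ((faces.length : Int) * 3 - max sample_offset_frames 0) + n_frames
instance (n_frames : Int) (faces : List (Option (List (String × Int)))) (sample_offset_frames : Int) : Decidable (D_expand_to_per_frame_py n_frames faces sample_offset_frames) := by unfold D_expand_to_per_frame_py; infer_instance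

def Spec_expand_to_per_frame_py (n_frames : Int) (faces : List (Option (List (String × Int)))) (sample_offset_frames : Int) (out : List (Option (List (String × Int)))) : Prop := ¬ D_expand_to_per_frame_py n_frames faces sample_offset_frames → out = expand_to_per_frame_py_alt n_frames faces sample_offset_frames
instance (n_frames : Int) (faces : List (Option (List (String × Int)))) (sample_offset_frames : Int) (out : List (Option (List (String × Int)))) : Decidable (Spec_expand_to_per_frame_py n_frames faces sample_offset_frames out) := by unfold Spec_expand_to_per_frame_py; infer_instance

def pvDiffWitness_expand_to_per_frame_py : Int × (List (Option (List (String × Int)))) × Int := (-1, [none], 0)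
def pvDiffWitnessOut_expand_to_per_frame_py : (List (Option (List (String × Int)))) × (List (Option (List (String × Int)))) := ([none, none], [])

-- ===== CLAIM (what is proved, stated in full; the proofs are below) =====
def Claim_unchanged_expand_to_per_frame_py : Prop := ∀ (n_frames : Int) (faces : List (Option (List (String × Int)))) (sample_offset_frames : Int), Dom_expand_to_per_frame_py n_frames faces sample_offset_frames → Spec_expand_to_per_frame_py n_frames faces sample_offset_frames (expand_to_per_frame_py n_frames faces sample_offset_frames)
def Claim_changed_expand_to_per_frame_py : Prop := Dom_expand_to_per_frame_py (pvDiffWitness_expand_to_per_frame_py.1) (pvDiffWitness_expand_to_per_frame_py.2.1) (pvDiffWitness_expand_to_per_frame_py.2.2) ∧ D_expand_to_per_frame_py (pvDiffWitness_expand_to_per_frame_py.1) (pvDiffWitness_expand_to_per_frame_py.2.1) (pvDiffWitness_expand_to_per_frame_py.2.2) ∧ expand_to_per_frame_py (pvDiffWitness_expand_to_per_frame_py.1) (pvDiffWitness_expand_to_per_frame_py.2.1) (pvDiffWitness_expand_to_per_frame_py.2.2) = pvDiffWitnessOut_expand_to_per_frame_py.1 ∧ expand_to_per_frame_py_alt (pvDiffWitness_expand_to_per_frame_py.1)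 (pvDiffWitness_expand_to_per_frame_py.2.1) (pvDiffWitness_expand_to_per_frame_py.2.2) = pvDiffWitnessOut_expand_to_per_frame_py.2 ∧ pvDiffWitnessOut_expand_to_per_frame_py.1 ≠ pvDiffWitnessOut_expand_to_per_frame_py.2
def Claim_exact_expand_to_per_frame_py : Prop := ∀ (n_frames : Int) (faces : List (Option (List (String × Int)))) (sample_offset_frames : Int), Dom_expand_to_per_frame_py n_frames faces sample_offset_frames → D_expand_to_per_frame_py n_frames faces sample_offset_frames → expand_to_per_frame_py n_frames faces sample_offset_frames ≠ expand_to_per_frame_py_alt n_frames faces sample_offset_frames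

-- ===== LEMMAS AND PROOFS =====

theorem pv_foldl_eq_flatMap {α : Type} (faces : List α) (init : List (α)) :
    faces.foldl (fun acc v => acc ++ List.replicate 3 v) init = init ++ faces.flatMap (fun v => List.replicate 3 v) := by
  induction faces generalizing init with
  | nil => simp
  | cons v vs ih => rw [List.foldl_cons, ih, List.flatMap_cons, List.append_assoc]

theorem pv_flat_len {α : Type} (faces : List α) :
    (faces.flatMap (fun v => List.replicate 3 v)).length = 3 * faces.length := by
  induction faces with
  | nil => simp
  | cons v vs ih => rw [List.flatMap_cons]; simp; ring

theorem pv_flat_get {α : Type} (faces : List α) (i : Nat) :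
    (faces.flatMap (fun v => List.replicate 3 v))[i]? = faces[i / 3]? := by
  induction faces generalizing i with
  | nil => simp
  | cons v vs ih =>
    match i, Nat.lt_or_ge i 3 with
    | 0, _ => simp
    | 1, _ => simp
    | 2, _ => simp
    | (j+3), _ =>
      have h3 : (j + 3) / 3 = j / 3 + 1 := by omega
      have hrep : List.replicate 3 v ++ List.flatMap (fun v => List.replicate 3 v) vs = v :: v :: v :: List.flatMap (fun v => List.replicate 3 v) vs := rfl
      rw [List.flatMap_cons, hrep, h3]
      simpa using ih j


theorem pv_main (n_frames : Int) (faces : List (Option (List (String × Int)))) (off : Int) :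
    ¬ D_expand_to_per_frame_py n_frames faces off →
    expand_to_per_frame_py n_frames faces off = expand_to_per_frame_py_alt n_frames faces off := by
  intro hnD
  set E : List (Option (List (String × Int))) := faces.flatMap (fun v => List.replicate 3 v) with hEdef
  have hElen : E.length = 3 * faces.length := pv_flat_len faces
  set o' : Nat := (max off 0).toNat with ho'def
  have ho : max off 0 = (o' : Int) := by omega
  have hfold : faces.foldl (fun acc v => acc ++ List.replicate 3 v) [] = E := by
    rw [pv_foldl_eq_flatMap, List.nil_append]
  set P : List (Option (List (String × Int))) := E.drop o' with hPdef
  have hper : (if off > 0 then PySem.List.slice (faces.foldl (fun acc v => acc ++ List.replicate 3 v) []) (some off) none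
      else (faces.foldl (fun acc v => acc ++ List.replicate 3 v) [])) = P := by
    rw [hfold]
    split_ifs with h
    · rw [PySem.List.slice_from E (by omega : (0:Int) ≤ off)]
      congr 1
      omega
    · have : o' = 0 := by omega
      rw [hPdef, this, List.drop_zero]
  have hPlen : P.length = 3 * faces.length - o' := by
    rw [hPdef, List.length_drop, hElen]
  have hL : ((P.length : Int)) = max 0 ((faces.length : Int) * 3 - max off 0) := by
    rw [hPlen]; omega
  have hPk : ∀ k : Nat, P[k]? = faces[(o' + k) / 3]? := by
    intro k
    rw [hPdef, List.getElem?_drop, hEdef, pv_flat_get]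
  -- the common per-index value of B
  set L : Int := max 0 ((faces.length : Int) * 3 - max off 0) with hLdef
  set padB : Option (List (String × Int)) := if 0 < L then faces.getLastD none else none with hpadBdef
  set f : Int → Option (List (String × Int)) := fun p =>
    if p < L then PySem.List.pyGetD faces (PySem.Int.floordiv (p + max off 0) 3) none else padB with hfdef
  have hB : expand_to_per_frame_py_alt n_frames faces off = (List.range n_frames.toNat).map (fun k : Nat => f (k : Int)) := by
    simp only [expand_to_per_frame_py_alt, PySem.List.pyRange_one, List.map_map]
    rw [← hLdef, ← hpadBdef]
    have h0 : (n_frames - 0).toNat = n_frames.toNat := by omega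
    rw [h0]
    congr 1
    funext k
    simp [hfdef]
  have hA : expand_to_per_frame_py n_frames faces off =
      (if n_frames ≤ (P.length : Int) then PySem.List.slice P none (some n_frames)
       else P ++ List.replicate (n_frames - (P.length : Int)).toNat (P.getLastD none)) := by
    simp only [expand_to_per_frame_py]
    rw [hper]
  -- value of f at an in-range index
  have hfval : ∀ k : Nat, (k : Int) < L → some (f (k : Int)) = P[k]? := by
    intro k hk
    have hkP : k < P.length := by omega
    have hidx : (o' + k) / 3 < faces.length := by omega
    have hfd : PySem.Int.floordiv ((k : Int) + max off 0) 3 = (((k + o') / 3 : Nat) : Int) := by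
      rw [ho]
      exact_mod_cast PySem.Int.floordiv_natCast (k + o') 3
    rw [hfdef]
    simp only [hk, if_pos, hfd, PySem.List.pyGetD_natCast]
    have hsw : (o' + k) / 3 = (k + o') / 3 := by omega
    rw [hPk k, hsw, List.getD_eq_getElem?_getD,
      List.getElem?_eq_getElem (by omega : (k + o') / 3 < faces.length)]
    rfl
  -- the pads agree
  have hpad : P.getLastD none = padB := by
    by_cases hP0 : P.length = 0
    · have hPnil : P = [] := List.length_eq_zero_iff.mp hP0
      have hL0 : ¬ 0 < L := by omega
      rw [hPnil, hpadBdef, if_neg hL0]; rfl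
    · have hLpos : 0 < L := by omega
      have h1 : o' + (P.length - 1) = 3 * faces.length - 1 := by omega
      have h2 : (3 * faces.length - 1) / 3 = faces.length - 1 := by omega
      rw [List.getLastD_eq_getLast?, List.getLast?_eq_getElem?, hPk (P.length - 1), h1, h2,
        hpadBdef, if_pos hLpos, List.getLastD_eq_getLast?, List.getLast?_eq_getElem?]
  rw [hA, hB]
  by_cases hn : n_frames < 0
  · -- outside D_: the post-offset expansion is at most |n|, so both sides are empty
    have hLle : L + n_frames ≤ 0 := by
      by_contra hc
      exact hnD ⟨hn, by omega⟩
    have hcond : n_frames ≤ (P.length : Int) := by omega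
    rw [if_pos hcond]
    have hk : n_frames = -(((-n_frames).toNat : Nat) : Int) := by omega
    rw [hk, PySem.List.slice_to_neg_natCast P (-n_frames).toNat (by omega)]
    have h0 : P.length - (-n_frames).toNat = 0 := by omega
    rw [h0, List.take_zero]
    have h1 : (-(((-n_frames).toNat : Nat) : Int)).toNat = 0 := by omega
    rw [h1]
    simp
  · rw [not_lt] at hn
    apply List.ext_getElem?
    intro k
    have hBk : (List.map (fun k : Nat => f (k : Int)) (List.range n_frames.toNat))[k]? =
        if k < n_frames.toNat then some (f (k : Int)) else none := by
      by_cases hk : k < n_frames.toNat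
      · rw [if_pos hk, List.getElem?_map, List.getElem?_range hk]; rfl
      · rw [if_neg hk]
        apply List.getElem?_eq_none
        simpa using hk
    rw [hBk]
    split_ifs with hcond hk hk
    · -- n ≤ |P| : A = P[:n]
      rw [PySem.List.slice_to P hn, List.getElem?_take]
      rw [if_pos hk, hfval k (by omega)]
    · rw [PySem.List.slice_to P hn, List.getElem?_take, if_neg hk]
    · -- |P| < n : A = P ++ pad-replicate
      by_cases hkP : k < P.length
      · rw [List.getElem?_append_left hkP, hfval k (by omega)]
      · rw [not_lt] at hkP
        rw [List.getElem?_append_right hkP, List.getElem?_replicate, if_pos (by omega), hpad]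
        rw [hfdef]
        simp only [if_neg (by omega : ¬ ((k:Int) < L))]
    · apply List.getElem?_eq_none
      simp only [List.length_append, List.length_replicate]
      omega

-- ===== VERDICT (by name: the statement is the Claim_ definition above) =====
theorem expand_to_per_frame_py_spec : Claim_unchanged_expand_to_per_frame_py := by
  intro n faces off _ hnD
  exact pv_main n faces off hnD

theorem expand_to_per_frame_py_changed : Claim_changed_expand_to_per_frame_py := by
  unfold Claim_changed_expand_to_per_frame_py; decide

theorem expand_to_per_frame_py_tight : Claim_exact_expand_to_per_frame_py := by
  intro n_frames faces off _ hD
  obtain ⟨hn, hpos⟩ := hD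
  have hB : expand_to_per_frame_py_alt n_frames faces off = [] := by
    simp only [expand_to_per_frame_py_alt, PySem.List.pyRange_one]
    have h0 : (n_frames - 0).toNat = 0 := by omega
    rw [h0]
    rfl
  rw [hB]
  intro hAnil
  set E : List (Option (List (String × Int))) := faces.flatMap (fun v => List.replicate 3 v) with hEdef
  have hElen : E.length = 3 * faces.length := pv_flat_len faces
  set o' : Nat := (max off 0).toNat with ho'def
  have hfold : faces.foldl (fun acc v => acc ++ List.replicate 3 v) [] = E := by
    rw [pv_foldl_eq_flatMap, List.nil_append]
  set P : List (Option (List (String × Int))) := E.drop o' with hPdef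
  have hper : (if off > 0 then PySem.List.slice (faces.foldl (fun acc v => acc ++ List.replicate 3 v) [] ) (some off) none
      else (faces.foldl (fun acc v => acc ++ List.replicate 3 v) [])) = P := by
    rw [hfold]
    split_ifs with h
    · rw [PySem.List.slice_from E (by omega : (0:Int) ≤ off)]
      congr 1
      omega
    · have : o' = 0 := by omega
      rw [hPdef, this, List.drop_zero]
  have hPlen : P.length = 3 * faces.length - o' := by
    rw [hPdef, List.length_drop, hElen]
  have hA : expand_to_per_frame_py n_frames faces off = PySem.List.slice P none (some n_frames) := by
    simp only [expand_to_per_frame_py]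
    rw [hper, if_pos (by omega : n_frames ≤ ((P.length : Int)))]
  have hk : n_frames = -(((-n_frames).toNat : Nat) : Int) := by omega
  rw [hA, hk, PySem.List.slice_to_neg_natCast P (-n_frames).toNat (by omega)] at hAnil
  have hlen := congrArg List.length hAnil
  simp only [List.length_take, List.length_nil] at hlen
  omega
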